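-- pv_equiv track=rewrite | github.com/nikhilvas123/file-info-py | file_details.py | count_each_special_char
-- ===== SOURCE A (Python) =====
-- import collections
--
-- def lines_to_characters(lines):
--     ''' Flattens the list to have characters'''
--     chars = [char for line in lines for word in line.strip("\n") for char in word]
--     return chars
--
-- def count_each_special_char(lines):
--     ''' Returns the number of each special character '''
--     chars = lines_to_characters(lines)
--     each_special_char_count = {}
--     for char in chars:
--         if not (char.isnumeric() or char.isalpha() or char == " "):
--             if char in each_special_char_count.keys():
--                 each_special_char_count[char] += 1
--             else:
--                 each_special_char_count[char] = 1
--     return collections.OrderedDict(sorted(each_special_char_count.items()))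
-- ===== SOURCE B (Python) =====
-- import collections
--
-- def count_each_special_char(lines):
--     ''' Returns the number of each special character (sort-then-group-runs) '''
--     specials = sorted(ch
--                       for line in lines
--                       for ch in line.strip("\n")
--                       if not (ch.isnumeric() or ch.isalpha() or ch == " "))
--     out = collections.OrderedDict()
--     i, n = 0, len(specials)
--     while i < n:
--         ch = specials[i]
--         j = i + 1
--         while j < n and specials[j] == ch:
--             j += 1
--         out[ch] = j - i
--         i = j
--     return out
-- ===== Notes on version B (the rewrite author's own statement) =====
-- stated objective: alternative
-- what changed: Replaces the running count-dict plus final sort of items with a sort-then-group-runs pass: the filtered special characters are sorted first and consecutive runs are counted to emit the (char, count) pairs already in order.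
import Mathlib
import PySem

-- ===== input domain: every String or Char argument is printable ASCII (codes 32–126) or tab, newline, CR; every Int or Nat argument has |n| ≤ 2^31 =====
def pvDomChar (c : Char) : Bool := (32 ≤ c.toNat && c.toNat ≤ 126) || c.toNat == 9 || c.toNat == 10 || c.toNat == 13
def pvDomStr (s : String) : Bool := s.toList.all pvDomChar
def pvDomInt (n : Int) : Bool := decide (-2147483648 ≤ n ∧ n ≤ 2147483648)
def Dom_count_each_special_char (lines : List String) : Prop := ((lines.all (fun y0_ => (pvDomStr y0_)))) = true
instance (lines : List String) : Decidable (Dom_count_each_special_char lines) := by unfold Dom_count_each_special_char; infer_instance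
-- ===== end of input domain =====

-- B replaces A's running count-dict plus final sort of the items by a sort-then-group-runs pass
-- over the filtered special characters (alternative decomposition, similar cost).

-- ===== PORT A =====
-- 'char' in the Python is a 1-character string: modelled as String.singleton of the Char.
-- str.isnumeric / str.isalpha are PySem.Str.strIsdigit / strIsalpha (exact on the printable-ASCII domain,
-- where isnumeric coincides with isdigit).
def count_each_special_char (lines : List String) : List (String × Int) :=
  PySem.List.sorted2
    ((lines.flatMap (fun line =>
        (PySem.Str.stripChars line "\n").toList.flatMap (fun word => [String.singleton word]))).foldl
      (fun d ch =>
        if !(PySem.Str.strIsdigit ch || PySem.Str.strIsalpha ch || ch == " ") then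
          (if d.contains ch then d.insert ch (d.getD ch 0 + 1) else d.insert ch 1)
        else d)
      PySem.Dict.empty).items
    (fun p => p.1) (fun p => p.2)

-- ===== PORT B =====
-- Source B's index while-loops (inner scan of the equal run, outer jump to the run's end) ported as
-- structural recursion: takeWhile (== head) is the inner scan, dropWhile the jump; exact.
def specialRuns : List String → List (String × Int)
  | [] => []
  | x :: xs =>
      (x, (1 + ((xs.takeWhile (fun y => y == x)).length : Int))) ::
        specialRuns (xs.dropWhile (fun y => y == x))
termination_by l => l.length
decreasing_by
  exact Nat.lt_succ_of_le (List.Sublist.length_le (List.dropWhile_sublist _))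

def count_each_special_char_alt (lines : List String) : List (String × Int) :=
  specialRuns
    (PySem.List.sorted
      (lines.flatMap (fun line =>
        (PySem.Str.stripChars line "\n").toList.filterMap (fun c =>
          if !(PySem.Str.strIsdigit (String.singleton c) || PySem.Str.strIsalpha (String.singleton c) ||
               String.singleton c == " ") then
            some (String.singleton c)
          else none)))
      (fun s => s))

-- ===== PRECONDITION & SPEC =====
def Spec_count_each_special_char (lines : List String) (out : List (String × Int)) : Prop := out = count_each_special_char_alt lines
instance (lines : List String) (out : List (String × Int)) : Decidable (Spec_count_each_special_char lines out) := by unfold Spec_count_each_special_char; infer_instance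

-- ===== CLAIM (what is proved, stated in full; the proofs are below) =====
def Claim_equal_count_each_special_char : Prop := ∀ (lines : List String), Dom_count_each_special_char lines → Spec_count_each_special_char lines (count_each_special_char lines)

-- ===== LEMMAS AND PROOFS =====

-- the special-character test and the filtered stream of special 1-char strings, shared by both analyses
def spChar (ch : String) : Bool := !(PySem.Str.strIsdigit ch || PySem.Str.strIsalpha ch || ch == " ")

def specialsOf (lines : List String) : List String :=
  (lines.flatMap (fun line => (PySem.Str.stripChars line "\n").toList.map String.singleton)).filter spChar

theorem flatMap_singleton_map {α β : Type} (f : α → β) (l : List α) :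
    l.flatMap (fun a => [f a]) = l.map f := by
  induction l with
  | nil => rfl
  | cons x xs ih => simp [List.flatMap_cons, ih]

theorem filter_flatMap' {α β : Type} (p : β → Bool) (g : α → List β) (l : List α) :
    (l.flatMap g).filter p = l.flatMap (fun a => (g a).filter p) := by
  induction l with
  | nil => rfl
  | cons x xs ih => simp [List.flatMap_cons, List.filter_append, ih]

theorem filterMap_eq_filter_map {α β : Type} (s : α → β) (p : β → Bool) (l : List α) :
    l.filterMap (fun a => if p (s a) then some (s a) else none) = (l.map s).filter p := by
  induction l with
  | nil => rfl
  | cons x xs ih => by_cases h : p (s x) <;> simp [h, ih]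

theorem foldl_if_filter {α β : Type} (p : α → Bool) (g : β → α → β) (l : List α) (b : β) :
    l.foldl (fun d x => if p x then g d x else d) b = (l.filter p).foldl g b := by
  induction l generalizing b with
  | nil => rfl
  | cons x xs ih => by_cases h : p x <;> simp [h, ih]

theorem count_step_eq (d : PySem.Dict String Int) (ch : String) :
    (if d.contains ch then d.insert ch (d.getD ch 0 + 1) else d.insert ch 1)
      = d.insert ch (d.getD ch 0 + 1) := by
  by_cases h : d.contains ch = true
  · simp [h]
  · have h0 : d.contains ch = false := by simpa using h
    rw [if_neg (by simp [h0]), PySem.Dict.getD_of_not_contains d 0 h0]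
    norm_num

-- A's counting loop is Counter on the filtered stream
theorem a_loop_eq_counter (chars : List String) :
    chars.foldl
      (fun d ch =>
        if !(PySem.Str.strIsdigit ch || PySem.Str.strIsalpha ch || ch == " ") then
          (if d.contains ch then d.insert ch (d.getD ch 0 + 1) else d.insert ch 1)
        else d)
      PySem.Dict.empty
    = PySem.Dict.counter (chars.filter spChar) := by
  delta spChar
  rw [foldl_if_filter]
  rw [show (fun (d : PySem.Dict String Int) ch =>
        if d.contains ch then d.insert ch (d.getD ch 0 + 1) else d.insert ch 1)
      = (fun d ch => d.insert ch (d.getD ch 0 + 1)) from funext fun d => funext fun ch => count_step_eq d ch]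
  exact PySem.Dict.foldl_insert_getD_add_one_eq_counter _

-- insertBy only looks at 'before x y' for y already in the accumulator
theorem insertBy_congr {α : Type} (b1 b2 : α → α → Bool) (x : α) (ys : List α)
    (h : ∀ y ∈ ys, b1 x y = b2 x y) :
    PySem.List.insertBy b1 x ys = PySem.List.insertBy b2 x ys := by
  induction ys with
  | nil => rfl
  | cons y ys ih =>
    have hxy := h y (by simp)
    show (if b1 x y then x :: y :: ys else y :: PySem.List.insertBy b1 x ys)
       = (if b2 x y then x :: y :: ys else y :: PySem.List.insertBy b2 x ys)
    rw [hxy, ih (fun z hz => h z (by simp [hz]))]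

theorem foldl_insertBy_congr {α : Type} (b1 b2 : α → α → Bool) (xs : List α)
    (hxx : ∀ a ∈ xs, ∀ b ∈ xs, b1 a b = b2 a b) (acc : List α)
    (hx : ∀ a ∈ xs, ∀ y ∈ acc, b1 a y = b2 a y) :
    xs.foldl (fun acc x => PySem.List.insertBy b1 x acc) acc
      = xs.foldl (fun acc x => PySem.List.insertBy b2 x acc) acc := by
  induction xs generalizing acc with
  | nil => rfl
  | cons x xs ih =>
    simp only [List.foldl_cons]
    rw [insertBy_congr b1 b2 x acc (hx x (by simp))]
    refine ih (fun a ha b hb => hxx a (by simp [ha]) b (by simp [hb])) _ ?_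
    intro a ha y hy
    rcases (PySem.List.mem_insertBy b2 x y acc).mp hy with rfl | hy'
    · exact hxx a (by simp [ha]) y (by simp)
    · exact hx a (by simp [ha]) y hy'

-- a tuple sort whose first key is injective on the list is the sort by the first key alone
theorem sorted2_eq_sorted {α κ₁ κ₂ : Type} [LinearOrder κ₁] [LinearOrder κ₂]
    (xs : List α) (k1 : α → κ₁) (k2 : α → κ₂)
    (h : ∀ a ∈ xs, ∀ b ∈ xs, k1 a = k1 b → a = b) :
    PySem.List.sorted2 xs k1 k2 = PySem.List.sorted xs k1 := by
  rw [PySem.List.sorted_eq_foldl_insertBy]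
  show xs.foldl
      (fun acc x => PySem.List.insertBy
        (fun a b => decide (k1 a < k1 b) || (!decide (k1 b < k1 a) && decide (k2 a < k2 b))) x acc) []
    = xs.foldl (fun acc x => PySem.List.insertBy (fun a b => decide (k1 a < k1 b)) x acc) []
  refine foldl_insertBy_congr _ _ xs ?_ [] (by simp)
  intro a ha b hb
  rcases lt_trichotomy (k1 a) (k1 b) with hlt | heq | hgt
  · simp [hlt]
  · have hab : a = b := h a ha b hb heq
    subst hab
    simp
  · have h1 : ¬ k1 a < k1 b := not_lt.mpr hgt.le
    simp [h1, hgt]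

theorem ofList_sublist {α : Type} [BEq α] [LawfulBEq α] (l : List α) :
    (PySem.Set.ofList l).Sublist l := by
  induction l with
  | nil => simp [PySem.Set.ofList_nil]
  | cons x xs ih =>
    rw [PySem.Set.ofList_cons]
    refine List.Sublist.cons₂ x (List.Sublist.trans ?_ ih)
    show (List.filter (fun y => !y == x) (PySem.Set.ofList xs)).Sublist (PySem.Set.ofList xs)
    exact List.filter_sublist
  
theorem discard_ofList_eq {α : Type} [BEq α] [LawfulBEq α] (x : α) (t d : List α)
    (ht : ∀ y ∈ t, y = x) (hd : x ∉ d) :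
    PySem.Set.discard (PySem.Set.ofList (t ++ d)) x = PySem.Set.ofList d := by
  induction t with
  | nil =>
    simp only [List.nil_append]
    have hall : ∀ y ∈ PySem.Set.ofList d, (!(y == x)) = true := by
      intro y hy
      have hyd : y ∈ d := (PySem.Set.mem_ofList _ _).mp hy
      have hne : y ≠ x := fun h => hd (h ▸ hyd)
      simp [hne]
    calc PySem.Set.discard (PySem.Set.ofList d) x
        = List.filter (fun y => !(y == x)) (PySem.Set.ofList d) := rfl
      _ = PySem.Set.ofList d := List.filter_eq_self.mpr hall
  | cons y t' ih =>
    have hy : y = x := ht y (by simp)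
    rw [hy, List.cons_append, PySem.Set.ofList_cons]
    have inner : List.filter (fun y => !y == x) (PySem.Set.discard (PySem.Set.ofList (t' ++ d)) x)
        = PySem.Set.discard (PySem.Set.ofList (t' ++ d)) x :=
      List.filter_eq_self.mpr (fun z hz => (List.mem_filter.mp hz).2)
    have step : PySem.Set.discard (x :: PySem.Set.discard (PySem.Set.ofList (t' ++ d)) x) x
        = PySem.Set.discard (PySem.Set.ofList (t' ++ d)) x := by
      show List.filter _ _ = _
      rw [List.filter_cons_of_neg (by simp)]
      exact inner
    rw [step]
    exact ih (fun z hz => ht z (by simp [hz]))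

theorem dropWhile_head_false {α : Type} (p : α → Bool) (xs : List α) {y : α} {d' : List α}
    (h : xs.dropWhile p = y :: d') : p y = false := by
  induction xs with
  | nil => simp [List.dropWhile] at h
  | cons z zs ih =>
    rw [List.dropWhile_cons] at h
    split_ifs at h with hz
    · exact ih h
    · cases h
      simpa using hz

-- run-length grouping of a (≤)-sorted list = first-occurrence dedup paired with element counts
theorem specialRuns_sorted (l : List String) (h : l.Pairwise (· ≤ ·)) :
    specialRuns l = (PySem.List.dedup l).map (fun k => (k, (List.count k l : Int))) := by
  induction l using specialRuns.induct with
  | case1 => simp [specialRuns, PySem.List.dedup, PySem.Set.ofList_nil]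
  | case2 x xs ih =>
    have hxd : x ∉ xs.dropWhile (fun y => y == x) := by
      intro hmem
      cases hdw : xs.dropWhile (fun y => y == x) with
      | nil => rw [hdw] at hmem; simp at hmem
      | cons y d' =>
        have hy : (y == x) = false := dropWhile_head_false (p := fun y => y == x) (xs := xs) hdw
        have hyx : y ≠ x := by simpa using hy
        rw [hdw] at hmem
        rcases List.mem_cons.mp hmem with rfl | hmem'
        · exact hyx rfl
        · have hsubl : (y :: d').Sublist xs := by
            rw [← hdw]; exact List.dropWhile_sublist _
          have hpxs : xs.Pairwise (· ≤ ·) := (List.pairwise_cons.mp h).2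
          have hyd : (y :: d').Pairwise (· ≤ ·) := List.Pairwise.sublist hsubl hpxs
          have hylex : y ≤ x := (List.pairwise_cons.mp hyd).1 x hmem'
          have hxley : x ≤ y := (List.pairwise_cons.mp h).1 y (hsubl.subset (by simp))
          exact hyx (le_antisymm hylex hxley)
    have ht : ∀ y ∈ xs.takeWhile (fun y => y == x), y = x := by
      intro y hy
      exact eq_of_beq (List.mem_takeWhile_imp (p := fun z => z == x) hy)
    have hsplit : xs = xs.takeWhile (fun y => y == x) ++ xs.dropWhile (fun y => y == x) :=
      (List.takeWhile_append_dropWhile).symm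
    have hdrop_pw : (xs.dropWhile (fun y => y == x)).Pairwise (· ≤ ·) :=
      List.Pairwise.sublist (List.dropWhile_sublist _) (List.pairwise_cons.mp h).2
    have hded : PySem.List.dedup (x :: xs)
        = x :: PySem.List.dedup (xs.dropWhile (fun y => y == x)) := by
      show PySem.Set.ofList (x :: xs) = _
      rw [PySem.Set.ofList_cons]
      conv_lhs => rw [hsplit]
      rw [discard_ofList_eq x _ _ ht hxd]
      rfl
    have hcount_t : List.count x (xs.takeWhile (fun y => y == x))
        = (xs.takeWhile (fun y => y == x)).length := by
      rw [List.count_eq_length]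
      intro b hb
      rw [ht b hb]
    have hcount_d : List.count x (xs.dropWhile (fun y => y == x)) = 0 :=
      List.count_eq_zero.mpr hxd
    have hcx : List.count x (x :: xs)
        = 1 + (xs.takeWhile (fun y => y == x)).length := by
      rw [List.count_cons_self]
      conv_lhs => rw [hsplit]
      rw [List.count_append, hcount_t, hcount_d]
      omega
    rw [show specialRuns (x :: xs)
        = (x, (1 + ((xs.takeWhile (fun y => y == x)).length : Int))) ::
            specialRuns (xs.dropWhile (fun y => y == x)) from by
          rw [specialRuns]]
    rw [ih hdrop_pw, hded]
    simp only [List.map_cons]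
    congr 1
    · simp only [Prod.mk.injEq, true_and]
      rw [hcx]
      push_cast
      ring
    · apply List.map_congr_left
      intro k hk
      have hkd : k ∈ xs.dropWhile (fun y => y == x) := by
        have : k ∈ PySem.Set.ofList (xs.dropWhile (fun y => y == x)) := hk
        exact (PySem.Set.mem_ofList _ _).mp this
      have hkx : k ≠ x := fun hkx => hxd (hkx ▸ hkd)
      have hcnt : List.count k (x :: xs) = List.count k (xs.dropWhile (fun y => y == x)) := by
        rw [List.count_cons]
        conv_lhs => rw [hsplit]
        rw [List.count_append]
        have h1 : List.count k (xs.takeWhile (fun y => y == x)) = 0 :=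
          List.count_eq_zero.mpr (fun hmem => hkx (ht k hmem))
        have h2 : (x == k) = false := by simpa using (Ne.symm hkx)
        rw [h1, h2]
        simp
      rw [hcnt]

-- the common normal form of both sides
theorem central (S : List String) :
    PySem.List.sorted2 (PySem.Dict.counter S).items (fun p => p.1) (fun p => p.2)
      = specialRuns (PySem.List.sorted S (fun s => s)) := by
  have hnod : (PySem.Set.ofList S).Nodup := PySem.Set.nodup_ofList S
  have hitems : (PySem.Dict.counter S).items
      = (PySem.Set.ofList S).map (fun k => (k, (List.count k S : Int))) :=
    PySem.Dict.items_counter S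
  have hinj : ∀ a ∈ (PySem.Dict.counter S).items, ∀ b ∈ (PySem.Dict.counter S).items,
      a.1 = b.1 → a = b := by
    intro a ha b hb hab
    rw [hitems] at ha hb
    obtain ⟨ka, hka, rfl⟩ := List.mem_map.mp ha
    obtain ⟨kb, hkb, rfl⟩ := List.mem_map.mp hb
    simp only at hab
    simp [hab]
  rw [sorted2_eq_sorted _ _ _ hinj]
  have hKpw : (PySem.List.sorted (PySem.Set.ofList S) (fun x => x)).Pairwise (· < ·) :=
    PySem.List.sorted_ofList_pairwise_lt S
  have hKperm : (PySem.List.sorted (PySem.Set.ofList S) (fun x => x)).Perm (PySem.Set.ofList S) :=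
    PySem.List.sorted_perm _ _ _
  have hA : PySem.List.sorted (PySem.Dict.counter S).items (fun p => p.1)
      = (PySem.List.sorted (PySem.Set.ofList S) (fun x => x)).map
          (fun k => (k, (List.count k S : Int))) := by
    apply PySem.List.sorted_eq_of_perm_of_pairwise_lt
    · rw [hitems]
      exact hKperm.map _
    · exact List.pairwise_map.mpr (by simpa using hKpw)
  rw [hA]
  have hsp : (PySem.List.sorted S (fun s => s)).Pairwise (· ≤ ·) := by
    simpa using PySem.List.sorted_pairwise S (fun s => s)
  rw [specialRuns_sorted _ hsp]
  have hndd : (PySem.List.dedup (PySem.List.sorted S (fun s => s))).Nodup :=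
    PySem.Set.nodup_ofList _
  have hle : (PySem.List.dedup (PySem.List.sorted S (fun s => s))).Pairwise (· ≤ ·) :=
    List.Pairwise.sublist (ofList_sublist _) hsp
  have hlt : (PySem.List.dedup (PySem.List.sorted S (fun s => s))).Pairwise (· < ·) :=
    (hle.and hndd).imp (fun hab => lt_of_le_of_ne hab.1 hab.2)
  have hperm : (PySem.List.dedup (PySem.List.sorted S (fun s => s))).Perm (PySem.Set.ofList S) := by
    rw [List.perm_ext_iff_of_nodup hndd hnod]
    intro a
    simp [PySem.List.dedup, PySem.Set.mem_ofList, PySem.List.mem_sorted]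
  have hded : PySem.List.dedup (PySem.List.sorted S (fun s => s))
      = PySem.List.sorted (PySem.Set.ofList S) (fun x => x) :=
    (PySem.List.sorted_eq_of_perm_of_pairwise_lt _ _ _ hperm (by simpa using hlt)).symm
  rw [hded]
  apply List.map_congr_left
  intro k hk
  have hc : List.count k (PySem.List.sorted S (fun s => s)) = List.count k S :=
    (PySem.List.sorted_perm _ _ _).count_eq k
  rw [hc]

theorem a_eq (lines : List String) :
    count_each_special_char lines
      = PySem.List.sorted2 (PySem.Dict.counter (specialsOf lines)).items
          (fun p => p.1) (fun p => p.2) := by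
  unfold count_each_special_char specialsOf
  simp only [flatMap_singleton_map]
  rw [a_loop_eq_counter]

theorem b_eq (lines : List String) :
    count_each_special_char_alt lines
      = specialRuns (PySem.List.sorted (specialsOf lines) (fun s => s)) := by
  unfold count_each_special_char_alt specialsOf
  delta spChar
  rw [filter_flatMap']
  simp only [← filterMap_eq_filter_map]

-- ===== VERDICT (by name: the statement is the Claim_ definition above) =====
theorem count_each_special_char_spec : Claim_equal_count_each_special_char := by
  intro lines _
  show count_each_special_char lines = count_each_special_char_alt lines
  rw [a_eq, b_eq, central]
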